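-- pv_equiv track=rewrite | github.com/TheWeeWum/RandomGamesPython | # Python text game copy.py | itemListMaker
-- ===== SOURCE A (Python) =====
-- def itemListMaker(items):
--     player_items = []
--     # removes these characters
--     disallowed_characters = "[],'"
--     splitted = []
--     # splits the items by spaces (so don't put spaces in the item ids)
--     splitted = items.split(" ")
--     # for each individual word
--     for each in splitted:
--         # remove all of those characters
--         for character in disallowed_characters:
--             each = each.replace(character, "")
--         # append this new string to the list
--         player_items.append(each)
--     # return the list to be applied to the dictionary
--     return player_items
-- ===== SOURCE B (Python) =====
-- def itemListMaker(items):
--     # Clean the whole string once (none of the removed characters is a space,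
--     # so token boundaries are unchanged), then split.
--     cleaned = "".join(c for c in items if c not in "[],'")
--     return cleaned.split(" ")
-- ===== Notes on version B (the rewrite author's own statement) =====
-- stated objective: simpler
-- what changed: B removes the disallowed characters from the whole string in one global filtering pass and then splits once, instead of A's split followed by a nested per-token loop over the disallowed characters with repeated str.replace.
import Mathlib
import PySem

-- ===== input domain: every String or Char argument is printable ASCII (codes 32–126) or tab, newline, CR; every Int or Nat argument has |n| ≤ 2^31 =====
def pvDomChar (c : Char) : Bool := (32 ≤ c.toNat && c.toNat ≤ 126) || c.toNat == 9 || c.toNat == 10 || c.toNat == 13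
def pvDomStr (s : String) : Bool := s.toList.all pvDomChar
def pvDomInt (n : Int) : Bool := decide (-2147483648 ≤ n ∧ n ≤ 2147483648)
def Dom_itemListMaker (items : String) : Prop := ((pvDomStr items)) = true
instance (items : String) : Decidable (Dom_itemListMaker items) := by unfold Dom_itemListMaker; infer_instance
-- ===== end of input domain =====

-- B cleans the whole string in one global filtering pass and splits once, instead of
-- A's split followed by a nested per-token loop of str.replace calls (objective: simpler).

-- ===== PORT A =====
def itemListMaker (items : String) : List String :=
  -- player_items = []; disallowed_characters = "[],'"; splitted = items.split(" ")
  let disallowed_characters : String := "[],'"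
  let splitted : List String :=
    (PySem.Chars.splitOn items.toList " ".toList).map String.ofList
  -- for each in splitted: for character in disallowed_characters: each = each.replace(character, "")
  --                       player_items.append(each)
  splitted.foldl
    (fun player_items each =>
      player_items ++
        [disallowed_characters.toList.foldl
          (fun each character => PySem.Str.replace each (String.ofList [character]) "") each])
    []

-- ===== PORT B =====
def itemListMaker_alt (items : String) : List String :=
  -- cleaned = "".join(c for c in items if c not in "[],'")  ('c not in str' = char membership)
  let cleaned : String :=
    String.ofList (items.toList.filter (fun c => !("[],'".toList.contains c)))
  -- return cleaned.split(" ")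
  (PySem.Chars.splitOn cleaned.toList " ".toList).map String.ofList

-- ===== PRECONDITION & SPEC =====
def Spec_itemListMaker (items : String) (out : List String) : Prop := out = itemListMaker_alt items
instance (items : String) (out : List String) : Decidable (Spec_itemListMaker items out) := by unfold Spec_itemListMaker; infer_instance

-- ===== CLAIM (what is proved, stated in full; the proofs are below) =====
def Claim_equal_itemListMaker : Prop := ∀ (items : String), Dom_itemListMaker items → Spec_itemListMaker items (itemListMaker items)

-- ===== LEMMAS AND PROOFS =====

theorem pv_replace_go_filter (c : Char) :
    ∀ (fuel : Nat) (l acc : List Char), l.length ≤ fuel →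
      PySem.Chars.replace.go [c] [] fuel l acc = acc.reverse ++ l.filter (· != c) := by
  intro fuel
  induction fuel with
  | zero =>
    intro l acc h
    have : l = [] := List.eq_nil_of_length_eq_zero (Nat.le_zero.mp h)
    subst this
    simp [PySem.Chars.replace.go]
  | succ n ih =>
    intro l acc h
    cases l with
    | nil => simp [PySem.Chars.replace.go]
    | cons d t =>
      simp only [PySem.Chars.replace.go, List.isPrefixOf, Bool.and_true, List.length_cons] at *
      by_cases hdc : c = d
      · subst hdc
        simp only [beq_self_eq_true, if_true, List.drop_succ_cons, List.length_nil, List.drop_zero, List.reverse_nil,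
          List.nil_append]
        rw [ih t acc (by omega)]
        simp
      · have : (c == d) = false := by simp [hdc]
        simp only [this, if_neg Bool.false_ne_true]
        rw [ih t (d :: acc) (by omega)]
        simp [bne, BEq.symm_false this]

theorem pv_replace_single (l : List Char) (c : Char) :
    PySem.Chars.replace l [c] [] = l.filter (· != c) := by
  simp [PySem.Chars.replace, pv_replace_go_filter c l.length l [] le_rfl]

def pvSplitSp : List Char → List (List Char)
  | [] => [[]]
  | c :: t => if c = ' ' then [] :: pvSplitSp t else (pvSplitSp t).modifyHead (c :: ·)

theorem pv_splitOn_go_sp :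
    ∀ (fuel : Nat) (l cur : List Char) (acc : List (List Char)), l.length < fuel →
      PySem.Chars.splitOn.go [' '] fuel l cur acc
        = acc.reverse ++ (pvSplitSp l).modifyHead (cur.reverse ++ ·) := by
  intro fuel
  induction fuel with
  | zero => intro l cur acc h; omega
  | succ n ih =>
    intro l cur acc h
    cases l with
    | nil => simp [PySem.Chars.splitOn.go, pvSplitSp]
    | cons d t =>
      simp only [PySem.Chars.splitOn.go, List.isPrefixOf, Bool.and_true, List.length_cons] at *
      by_cases hd : d = ' '
      · subst hd
        simp only [beq_self_eq_true, if_true, List.length_nil, List.drop_succ_cons,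
          List.drop_zero]
        rw [ih t [] (cur.reverse :: acc) (by omega)]
        simp only [pvSplitSp, List.reverse_nil, List.reverse_cons, List.append_assoc,
          List.singleton_append]
        cases pvSplitSp t with
        | nil => simp
        | cons hdl tl => simp
      · have hb : (' ' == d) = false := by simp [Ne.symm hd]
        simp only [hb, if_neg Bool.false_ne_true]
        rw [ih t (d :: cur) acc (by omega)]
        simp only [pvSplitSp, if_neg hd]
        cases pvSplitSp t with
        | nil => simp
        | cons hdl tl => simp

theorem pv_splitOn_sp (l : List Char) :
    PySem.Chars.splitOn l [' '] = pvSplitSp l := by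
  rw [PySem.Chars.splitOn, pv_splitOn_go_sp (l.length + 1) l [] [] (by omega)]
  cases pvSplitSp l with
  | nil => simp
  | cons h t => simp

theorem pv_sp_filter (p : Char → Bool) (hp : p ' ' = true) (l : List Char) :
    pvSplitSp (l.filter p) = (pvSplitSp l).map (List.filter p) := by
  induction l with
  | nil => simp [pvSplitSp]
  | cons c t ih =>
    by_cases hc : p c
    · simp only [List.filter_cons, hc, if_true, pvSplitSp]
      by_cases hsp : c = ' '
      · simp [hsp, ih]
      · simp only [if_neg hsp, ih]
        cases pvSplitSp t with
        | nil => simp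
        | cons hdl tl => simp [hc]
    · have hsp : c ≠ ' ' := fun h => by rw [h] at hc; exact hc hp
      simp only [List.filter_cons, hc, if_neg Bool.false_ne_true, pvSplitSp, if_neg hsp, ih]
      cases pvSplitSp t with
      | nil => simp
      | cons hdl tl => simp [hc]

theorem pv_clean_fold :
    ∀ (cs : List Char) (s : String),
      cs.foldl (fun each character => PySem.Str.replace each (String.ofList [character]) "") s
        = String.ofList (s.toList.filter (fun c => !(cs.contains c))) := by
  intro cs
  induction cs with
  | nil => intro s; simp
  | cons c rest ih =>
    intro s
    simp only [List.foldl_cons, ih]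
    congr 1
    simp only [PySem.Str.toList_replace, String.toList_ofList, String.toList_empty, pv_replace_single,
      List.filter_filter]
    apply List.filter_congr
    intro a _
    simp only [List.contains_cons, Bool.not_or]
    have hc : (c == a) = (a == c) := by
      by_cases h : c = a
      · simp [h]
      · simp [h, Ne.symm h]
    simp [bne, Bool.and_comm]

theorem pv_foldl_append_map {α β : Type} (f : α → β) (l : List α) (init : List β) :
    l.foldl (fun acc x => acc ++ [f x]) init = init ++ l.map f := by
  induction l generalizing init with
  | nil => simp
  | cons x t ih => simp [ih]

theorem pv_main (items : String) : itemListMaker items = itemListMaker_alt items := by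
  unfold itemListMaker itemListMaker_alt
  have hsep : " ".toList = [' '] := by decide
  have hp : (fun c => !("[],'".toList.contains c)) ' ' = true := by decide
  simp only [hsep, String.toList_ofList, pv_foldl_append_map, pv_clean_fold, pv_splitOn_sp,
    List.map_map, List.nil_append]
  rw [pv_sp_filter _ hp, List.map_map]
  apply List.map_congr_left
  intro tk _
  simp [String.toList_ofList]

-- ===== VERDICT =====
theorem itemListMaker_spec : Claim_equal_itemListMaker := by
  intro items _
  exact pv_main items
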